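-- pv_equiv track=rewrite | github.com/ram-alb/radio-cross | radio_cross/parser.py | count_crosses
-- ===== SOURCE A (Python) =====
-- def count_crosses(radio_data):
--     """
--     Count crosses by subnetworks.
--
--     Args:
--         radio_data (dict): result of parsing
--
--     Returns:
--         dict
--     """
--     stat = {}
--     radio_params = radio_data.values()
--     for radio_param in radio_params:
--         subnetwork = radio_param['subnetwork']
--         if stat.get(subnetwork):
--             stat[subnetwork] += 1
--         else:
--             stat[subnetwork] = 1
--     sorted_stat = {subnet: stat[subnet] for subnet in sorted(stat)}
--     sorted_stat['Total'] = len(radio_params)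
--     return sorted_stat
-- ===== SOURCE B (Python) =====
-- def _runs(subs):
--     """Run-length encode a sorted list: [(value, run length), ...]."""
--     if not subs:
--         return []
--     head = subs[0]
--     i = 1
--     while i < len(subs) and subs[i] == head:
--         i += 1
--     return [(head, i)] + _runs(subs[i:])
--
--
-- def count_crosses(radio_data):
--     """
--     Count crosses by subnetworks.
--
--     Args:
--         radio_data (dict): result of parsing
--
--     Returns:
--         dict
--     """
--     subs = sorted(rp['subnetwork'] for rp in radio_data.values())
--     result = {s: c for s, c in _runs(subs)}
--     result['Total'] = len(radio_data)
--     return result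
-- ===== Notes on version B (the rewrite author's own statement) =====
-- stated objective: alternative
-- what changed: A counts subnetworks into a dict and then rebuilds it over its sorted keys; B sorts the raw subnetwork values once and run-length encodes the consecutive runs, so the counting dict and the key-sort pass disappear.
import Mathlib
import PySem

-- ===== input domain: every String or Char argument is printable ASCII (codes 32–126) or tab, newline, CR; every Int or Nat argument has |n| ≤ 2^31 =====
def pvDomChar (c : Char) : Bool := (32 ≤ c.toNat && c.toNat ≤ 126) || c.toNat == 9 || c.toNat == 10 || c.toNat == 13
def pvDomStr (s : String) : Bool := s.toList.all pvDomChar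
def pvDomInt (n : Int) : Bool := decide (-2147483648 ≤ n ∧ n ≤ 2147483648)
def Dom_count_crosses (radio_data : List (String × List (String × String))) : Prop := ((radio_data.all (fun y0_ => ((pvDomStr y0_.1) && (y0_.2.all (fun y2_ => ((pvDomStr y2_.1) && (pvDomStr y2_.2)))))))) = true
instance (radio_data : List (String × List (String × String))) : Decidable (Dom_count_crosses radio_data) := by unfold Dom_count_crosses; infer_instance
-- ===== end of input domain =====

-- B replaces A's "count into a dict, then rebuild it with sorted keys" by "sort the raw
-- subnetwork values once, then run-length encode the consecutive runs"; same return value.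

-- ===== PORT A =====
-- radio_param['subnetwork'] (total form: under Pre_ the key is present)
def subnetOf (params : List (String × String)) : String :=
  (PySem.Dict.mk params).getD "subnetwork" ""

def count_crosses (radio_data : List (String × List (String × String))) : List (String × Int) :=
  let stat : PySem.Dict String Int :=
    radio_data.foldl (fun st kv =>
      let subnetwork := subnetOf kv.2
      if st.getD subnetwork 0 ≠ 0 then st.insert subnetwork (st.getD subnetwork 0 + 1)
      else st.insert subnetwork 1) PySem.Dict.empty
  let sorted_stat : PySem.Dict String Int :=
    (PySem.List.sorted stat.keys (fun x => x)).foldl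
      (fun d subnet => d.insert subnet (stat.getD subnet 0)) PySem.Dict.empty
  (sorted_stat.insert "Total" (radio_data.length : Int)).items

-- ===== PORT B =====
-- _runs: scan the leading run of the head value, recurse on the rest
def pvRuns : List String → List (String × Int)
  | [] => []
  | x :: xs =>
    (x, 1 + ((xs.takeWhile (· == x)).length : Int)) :: pvRuns (xs.dropWhile (· == x))
termination_by l => l.length
decreasing_by
  have := List.length_dropWhile_le (· == x) xs; simp; omega

def count_crosses_alt (radio_data : List (String × List (String × String))) : List (String × Int) :=
  let subs := PySem.List.sorted (radio_data.map (fun kv => subnetOf kv.2)) (fun x => x)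
  ((PySem.Dict.ofList (pvRuns subs)).insert "Total" (radio_data.length : Int)).items

-- ===== PRECONDITION & SPEC =====
-- Pre_ requires every inner dict to contain the key 'subnetwork' (otherwise A raises KeyError),
-- and — an artefact of encoding dicts as association lists only: genuine Python dicts satisfy it
-- automatically — that the outer key list and each inner key list contain no duplicate keys.
def Pre_count_crosses (radio_data : List (String × List (String × String))) : Prop :=
  (radio_data.map Prod.fst).Nodup ∧
  ∀ p ∈ radio_data, (p.2.map Prod.fst).Nodup ∧ "subnetwork" ∈ p.2.map Prod.fst
instance (radio_data : List (String × List (String × String))) : Decidable (Pre_count_crosses radio_data) := by unfold Pre_count_crosses; infer_instance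

def pvWitness_count_crosses : (List (String × List (String × String))) :=
  [("cell1", [("subnetwork", "S1")]), ("cell2", [("subnetwork", "S2"), ("vendor", "x")])]

def Spec_count_crosses (radio_data : List (String × List (String × String))) (out : List (String × Int)) : Prop := out = count_crosses_alt radio_data
instance (radio_data : List (String × List (String × String))) (out : List (String × Int)) : Decidable (Spec_count_crosses radio_data out) := by unfold Spec_count_crosses; infer_instance

-- ===== CLAIM (what is proved, stated in full; the proofs are below) =====
def Claim_equal_count_crosses : Prop := ∀ (radio_data : List (String × List (String × String))), Dom_count_crosses radio_data → Pre_count_crosses radio_data → Spec_count_crosses radio_data (count_crosses radio_data)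

-- ===== LEMMAS AND PROOFS =====

-- every element surviving dropWhile (== x) in a sorted tail is strictly above x
lemma pv_lt_of_mem_dropWhile (x : String) (xs : List String)
    (h : (x :: xs).Pairwise (· ≤ ·)) :
    ∀ y ∈ xs.dropWhile (· == x), x < y := by
  induction xs with
  | nil => simp
  | cons a as ih =>
    rcases List.pairwise_cons.1 h with ⟨hx, hp⟩
    by_cases hax : a = x
    · subst hax
      intro y hy
      rw [List.dropWhile_cons] at hy
      simp only [BEq.rfl, if_true] at hy
      exact ih (List.pairwise_cons.2 ⟨fun y hy => hx y (List.mem_cons_of_mem _ hy),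
        (List.pairwise_cons.1 hp).2⟩) y hy
    · intro y hy
      have hxa : x < a := lt_of_le_of_ne (hx a (List.mem_cons_self)) (Ne.symm hax)
      rw [List.dropWhile_cons] at hy
      simp only [beq_iff_eq, hax, if_false] at hy
      rcases List.mem_cons.1 hy with rfl | hy
      · exact hxa
      · exact lt_of_lt_of_le hxa ((List.pairwise_cons.1 hp).1 y hy)

lemma pv_runs_keys (l : List String) (hp : l.Pairwise (· ≤ ·)) :
    ∀ k, k ∈ (pvRuns l).map Prod.fst ↔ k ∈ l := by
  induction l using pvRuns.induct with
  | case1 => simp [pvRuns]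
  | case2 x xs ih =>
    intro k
    have hdrop : (xs.dropWhile (· == x)).Pairwise (· ≤ ·) :=
      List.Pairwise.sublist (List.dropWhile_sublist _) ((List.pairwise_cons.1 hp).2)
    have ihk := ih hdrop k
    simp only [pvRuns, List.map_cons, List.mem_cons, ihk]
    constructor
    · rintro (rfl | hk)
      · exact Or.inl rfl
      · exact Or.inr ((List.dropWhile_sublist _).mem hk)
    · rintro (rfl | hk)
      · exact Or.inl rfl
      · rw [← List.takeWhile_append_dropWhile (p := (· == x)) (l := xs)] at hk
        rcases List.mem_append.1 hk with hk | hk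
        · exact Or.inl (by simpa using (List.mem_takeWhile_imp hk))
        · exact Or.inr hk

lemma pv_runs_lt (l : List String) (hp : l.Pairwise (· ≤ ·)) :
    ((pvRuns l).map Prod.fst).Pairwise (· < ·) := by
  induction l using pvRuns.induct with
  | case1 => simp [pvRuns]
  | case2 x xs ih =>
    have hdrop : (xs.dropWhile (· == x)).Pairwise (· ≤ ·) :=
      List.Pairwise.sublist (List.dropWhile_sublist _) ((List.pairwise_cons.1 hp).2)
    simp only [pvRuns, List.map_cons]
    refine List.pairwise_cons.2 ⟨?_, ih hdrop⟩
    intro k hk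
    exact pv_lt_of_mem_dropWhile x xs hp k ((pv_runs_keys _ hdrop k).1 hk)

lemma pv_runs_counts (l : List String) (hp : l.Pairwise (· ≤ ·)) :
    ∀ p ∈ pvRuns l, p.2 = (l.count p.1 : Int) := by
  induction l using pvRuns.induct with
  | case1 => simp [pvRuns]
  | case2 x xs ih =>
    have hdrop : (xs.dropWhile (· == x)).Pairwise (· ≤ ·) :=
      List.Pairwise.sublist (List.dropWhile_sublist _) ((List.pairwise_cons.1 hp).2)
    have hlt := pv_lt_of_mem_dropWhile x xs hp
    intro p hps
    rw [pvRuns] at hps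
    rcases List.mem_cons.1 hps with rfl | hpmem
    · -- head run: count x (x::xs) = 1 + length of the leading run
      have hc : xs.count x = (xs.takeWhile (· == x)).length := by
        conv_lhs => rw [← List.takeWhile_append_dropWhile (p := (· == x)) (l := xs)]
        rw [List.count_append]
        have h1 : (xs.takeWhile (· == x)).count x = (xs.takeWhile (· == x)).length := by
          rw [List.count_eq_length]
          intro b hb
          have hbx : b = x := by simpa using List.mem_takeWhile_imp hb
          simp [hbx]
        have h2 : (xs.dropWhile (· == x)).count x = 0 := by
          rw [List.count_eq_zero]
          intro hmem
          exact absurd rfl (ne_of_gt (hlt x hmem))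
        omega
      show (1 + ((xs.takeWhile (· == x)).length : Int)) = ((x :: xs).count x : Int)
      rw [List.count_cons_self, hc]
      push_cast
      ring
    · -- a later run: its key is > x, so the head run contributes no occurrences
      have h2 := ih hdrop p hpmem
      have hmem : p.1 ∈ xs.dropWhile (· == x) :=
        (pv_runs_keys _ hdrop p.1).1 (List.mem_map.2 ⟨p, hpmem, rfl⟩)
      have hxlt : x < p.1 := pv_lt_of_mem_dropWhile x xs hp p.1 hmem
      have hcount : (x :: xs).count p.1 = (xs.dropWhile (· == x)).count p.1 := by
        conv_lhs => rw [← List.takeWhile_append_dropWhile (p := (· == x)) (l := xs)]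
        rw [List.count_cons, List.count_append]
        have h1 : (xs.takeWhile (· == x)).count p.1 = 0 := by
          rw [List.count_eq_zero]
          intro hmem'
          have := List.mem_takeWhile_imp hmem'
          have : p.1 = x := by simpa using this
          exact absurd this (ne_of_gt hxlt)
        have hne : ¬ x = p.1 := ne_of_lt hxlt
        simp [h1, hne]
      rw [h2, hcount]

lemma pv_runs_nodup (l : List String) (hp : l.Pairwise (· ≤ ·)) :
    ((pvRuns l).map Prod.fst).Nodup :=
  (pv_runs_lt l hp).imp ne_of_lt

-- the characterisation of B's run-length list over a sorted input
lemma pv_runs_eq_map (xs : List String) :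
    pvRuns (PySem.List.sorted xs (fun x => x)) =
      (PySem.List.sorted (PySem.Set.ofList xs) (fun x => x)).map
        (fun k => (k, (xs.count k : Int))) := by
  set s := PySem.List.sorted xs (fun x => x) with hs
  have hp : s.Pairwise (· ≤ ·) := by
    simpa using PySem.List.sorted_pairwise xs (fun x => x)
  have hperm : s.Perm xs := PySem.List.sorted_perm xs (fun x => x) false
  have hkeys : PySem.List.sorted (PySem.Set.ofList xs) (fun x => x) = (pvRuns s).map Prod.fst := by
    apply PySem.List.sorted_eq_of_perm_of_pairwise_lt
    · refine (List.perm_ext_iff_of_nodup (pv_runs_nodup s hp) (PySem.Set.nodup_ofList xs)).2 ?_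
      intro a
      rw [pv_runs_keys s hp a, PySem.Set.mem_ofList]
      exact hperm.mem_iff
    · exact pv_runs_lt s hp
  rw [hkeys, List.map_map]
  conv_lhs => rw [← List.map_id (pvRuns s)]
  refine List.map_congr_left ?_
  intro p hps
  have h2 := pv_runs_counts s hp p hps
  have : s.count p.1 = xs.count p.1 := hperm.count_eq p.1
  rw [this] at h2
  simp only [Function.comp]
  rw [id, ← h2]

-- A's first loop builds Counter(subnetwork values)
lemma pv_stat_eq_counter (radio_data : List (String × List (String × String))) :
    radio_data.foldl (fun st kv =>
      let subnetwork := subnetOf kv.2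
      if st.getD subnetwork 0 ≠ 0 then st.insert subnetwork (st.getD subnetwork 0 + 1)
      else st.insert subnetwork 1) PySem.Dict.empty
    = PySem.Dict.counter (radio_data.map (fun kv => subnetOf kv.2)) := by
  have hbody : (fun (st : PySem.Dict String Int) (kv : String × List (String × String)) =>
      let subnetwork := subnetOf kv.2
      if st.getD subnetwork 0 ≠ 0 then st.insert subnetwork (st.getD subnetwork 0 + 1)
      else st.insert subnetwork 1)
      = fun st kv => st.insert (subnetOf kv.2) (st.getD (subnetOf kv.2) 0 + 1) := by
    funext st kv
    by_cases h : st.getD (subnetOf kv.2) 0 = 0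
    · simp [h]
    · simp [h]
  rw [hbody, ← PySem.Dict.foldl_insert_getD_add_one_eq_counter, List.foldl_map]

-- ===== VERDICT (by name: the statement is the Claim_ definition above) =====
theorem count_crosses_spec : Claim_equal_count_crosses := by
  intro radio_data _ _
  show count_crosses radio_data = count_crosses_alt radio_data
  unfold count_crosses count_crosses_alt
  simp only [pv_stat_eq_counter]
  set subsL := radio_data.map (fun kv => subnetOf kv.2) with hsubsL
  -- A's second loop: items of inserts over the sorted distinct keys
  have hkeys : (PySem.Dict.counter subsL).keys = PySem.Set.ofList subsL :=
    PySem.Dict.keys_counter subsL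
  have hnodupKeys : (PySem.List.sorted (PySem.Set.ofList subsL) (fun x => x)).Nodup := by
    have := (PySem.List.sorted_perm (PySem.Set.ofList subsL) (fun x => x) false).symm
    exact this.nodup (PySem.Set.nodup_ofList subsL)
  have hA : ((PySem.List.sorted (PySem.Dict.counter subsL).keys (fun x => x)).foldl
      (fun d subnet => d.insert subnet ((PySem.Dict.counter subsL).getD subnet 0))
      PySem.Dict.empty).items
      = (PySem.List.sorted (PySem.Set.ofList subsL) (fun x => x)).map
          (fun k => (k, (subsL.count k : Int))) := by
    rw [hkeys]
    rw [PySem.Dict.items_foldl_insert_fresh _ (fun k => k)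
      (fun k => (PySem.Dict.counter subsL).getD k 0) PySem.Dict.empty
      (by intro a _; exact PySem.Dict.contains_empty a)
      (by simpa using hnodupKeys)]
    simp only [PySem.Dict.getD_counter, PySem.Dict.empty, List.nil_append]
  -- B's dict-of-runs: items are the run list itself
  have hsorted_pairwise : (PySem.List.sorted subsL (fun x => x)).Pairwise (· ≤ ·) := by
    simpa using PySem.List.sorted_pairwise subsL (fun x => x)
  have hB : (PySem.Dict.ofList (pvRuns (PySem.List.sorted subsL (fun x => x)))).items
      = pvRuns (PySem.List.sorted subsL (fun x => x)) := by
    have h := PySem.Dict.items_foldl_insert_fresh (pvRuns (PySem.List.sorted subsL (fun x => x)))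
      Prod.fst Prod.snd PySem.Dict.empty
      (by intro a _; exact PySem.Dict.contains_empty a.1)
      (pv_runs_nodup _ hsorted_pairwise)
    simpa [PySem.Dict.items, PySem.Dict.empty] using h
  have hd : (PySem.List.sorted (PySem.Dict.counter subsL).keys (fun x => x)).foldl
      (fun d subnet => d.insert subnet ((PySem.Dict.counter subsL).getD subnet 0))
      PySem.Dict.empty
      = PySem.Dict.ofList (pvRuns (PySem.List.sorted subsL (fun x => x))) :=
    PySem.Dict.ext (by rw [hA, hB, pv_runs_eq_map])
  rw [hd]
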